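-- pv_equiv track=rewrite | github.com/mini102/Programmers_Greedy | A4.py | solution
-- ===== SOURCE A (Python) =====
-- def solution(people, limit):
--     answer = 0
--     tmp = min(people)
--
--     while len(people)!=0:
--         tmp = min(people)
--         people.remove(tmp)
--         if len(people)==0:
--             answer+=1
--             break
--         while tmp + min(people) <= limit:
--                 tmp += min(people)
--                 people.remove(min(people))
--                 if len(people)==0:
--                     break
--         answer+=1
--
--     return answer
-- ===== SOURCE B (Python) =====
-- def solution(people, limit):
--     answer = 0
--     cur = None
--     for p in sorted(people):
--         if cur is None or cur + p > limit:
--             answer += 1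
--             cur = p
--         else:
--             cur += p
--     return answer
-- ===== Notes on version B (the rewrite author's own statement) =====
-- stated objective: faster
-- what changed: Replaced the repeated min()+list.remove() scans (quadratic) with one sort followed by a single linear accumulating pass over the sorted list.
import Mathlib
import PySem

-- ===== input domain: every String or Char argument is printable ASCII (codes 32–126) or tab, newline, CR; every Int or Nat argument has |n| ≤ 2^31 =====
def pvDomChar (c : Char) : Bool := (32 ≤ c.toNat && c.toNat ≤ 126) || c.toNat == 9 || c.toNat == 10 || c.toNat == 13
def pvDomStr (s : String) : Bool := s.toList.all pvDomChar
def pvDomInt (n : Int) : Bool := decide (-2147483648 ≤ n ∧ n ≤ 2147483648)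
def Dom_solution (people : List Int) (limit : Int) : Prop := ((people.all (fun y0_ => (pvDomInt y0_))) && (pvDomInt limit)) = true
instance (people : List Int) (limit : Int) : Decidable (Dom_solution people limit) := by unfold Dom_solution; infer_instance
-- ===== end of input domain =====

-- B replaces A's repeated min()+remove() rescans with one sort and a single accumulating pass (faster in a timing run).
-- Note: Python A empties its `people` argument in place; the equivalence proved here concerns the return value only.

-- ===== PORT A =====
-- (pvRemove?_length_lt and solInner_length_le are cited by the ports' decreasing_by clauses, so they stay here)
theorem pvRemove?_length_lt {xs : List Int} {v : Int} {r : List Int}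
    (h : PySem.List.remove? xs v = some r) : r.length < xs.length := by
  have hv : v ∈ xs := by
    by_contra hv
    simp [(PySem.List.remove?_eq_none_iff xs v).mpr hv] at h
  rw [PySem.List.remove?_eq_some_erase xs v hv] at h
  injection h with h
  subst h
  have h1 := List.length_erase_of_mem hv
  have h2 := List.length_pos_of_mem hv
  omega

def solInner (limit tmp : Int) (people : List Int) : List Int :=
  match _h : PySem.List.min? people (fun y => y) with
  | none => people
  | some m =>
    if tmp + m ≤ limit then
      match h2 : PySem.List.remove? people m with
      | none => people
      | some rest =>
        if rest = [] then []
        else solInner limit (tmp + m) rest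
    else people
termination_by people.length
decreasing_by exact pvRemove?_length_lt h2

theorem solInner_length_le (limit tmp : Int) (people : List Int) :
    (solInner limit tmp people).length ≤ people.length := by
  fun_induction solInner limit tmp people
  case case4 people tmp m _h hle rest h2 hne ih =>
    exact le_trans ih (le_of_lt (pvRemove?_length_lt h2))
  all_goals simp

def solOuter (limit : Int) : List Int → Int → Int
  | [], answer => answer
  | x :: xs, answer =>
    match _h : PySem.List.min? (x :: xs) (fun y => y) with
    | none => answer
    | some m =>
      match h2 : PySem.List.remove? (x :: xs) m with
      | none => answer
      | some rest =>
        if rest = [] then answer + 1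
        else solOuter limit (solInner limit m rest) (answer + 1)
termination_by people _ => people.length
decreasing_by
  calc (solInner limit m rest).length ≤ rest.length := solInner_length_le limit m rest
    _ < (x :: xs).length := pvRemove?_length_lt h2

def solution (people : List Int) (limit : Int) : Int :=
  match PySem.List.min? people (fun y => y) with
  | none => 0
  | some _ => solOuter limit people 0

-- ===== PORT B =====
def solution_alt (people : List Int) (limit : Int) : Int :=
  ((PySem.List.sorted people (fun x => x) false).foldl
    (fun (st : Int × Option Int) p =>
      match st.2 with
      | none => (st.1 + 1, some p)
      | some cur => if cur + p > limit then (st.1 + 1, some p) else (st.1, some (cur + p)))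
    (0, none)).1


-- ===== PRECONDITION & SPEC =====
-- Pre_ excludes exactly the empty list, on which Python A raises ValueError (min() of an empty sequence).
def Pre_solution (people : List Int) (limit : Int) : Prop := people ≠ []
instance (people : List Int) (limit : Int) : Decidable (Pre_solution people limit) := by unfold Pre_solution; infer_instance
def pvWitness_solution : List Int × Int := ([3, 1, 2], 3)

def Spec_solution (people : List Int) (limit : Int) (out : Int) : Prop := out = solution_alt people limit
instance (people : List Int) (limit : Int) (out : Int) : Decidable (Spec_solution people limit out) := by unfold Spec_solution; infer_instance

-- ===== CLAIM (what is proved, stated in full; the proofs are below) =====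
def Claim_equal_solution : Prop := ∀ (people : List Int) (limit : Int), Dom_solution people limit → Pre_solution people limit → Spec_solution people limit (solution people limit)

-- ===== LEMMAS AND PROOFS =====

def grp (limit s : Int) : List Int → Int
  | [] => 1
  | x :: xs => if s + x ≤ limit then grp limit (s + x) xs else 1 + grp limit x xs

def grpTop (limit : Int) : List Int → Int
  | [] => 0
  | x :: xs => grp limit x xs

theorem sorted_eq_min_cons {xs : List Int} {m : Int}
    (h : PySem.List.min? xs (fun y => y) = some m) :
    PySem.List.sorted xs (fun x => x) false
      = m :: PySem.List.sorted (xs.erase m) (fun x => x) false := by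
  have hm : m ∈ xs := PySem.List.min?_mem h
  apply List.Perm.eq_of_pairwise (le := (· ≤ ·)) (fun a b _ _ hab hba => le_antisymm hab hba)
  · exact PySem.List.sorted_pairwise xs (fun x => x)
  · refine List.Pairwise.cons ?_ (PySem.List.sorted_pairwise _ (fun x => x))
    intro b hb
    exact PySem.List.min?_isMin h b (List.mem_of_mem_erase ((PySem.List.sorted_perm _ _ _).mem_iff.mp hb))
  · exact (PySem.List.sorted_perm _ _ _).trans
      ((List.perm_cons_erase hm).trans (List.Perm.cons m (PySem.List.sorted_perm _ _ _).symm))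

theorem foldB (limit : Int) (l : List Int) (a s : Int) :
    (l.foldl
      (fun (st : Int × Option Int) p =>
        match st.2 with
        | none => (st.1 + 1, some p)
        | some cur => if cur + p > limit then (st.1 + 1, some p) else (st.1, some (cur + p)))
      (a, some s)).1 = a + grp limit s l - 1 := by
  induction l generalizing a s with
  | nil => simp [grp]
  | cons x xs ih =>
    simp only [List.foldl_cons, grp]
    by_cases hc : s + x ≤ limit
    · rw [if_neg (by omega)]
      rw [if_pos hc, ih]
    · rw [if_pos (by omega), if_neg hc, ih]
      omega

theorem solution_alt_eq (people : List Int) (limit : Int) :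
    solution_alt people limit = grpTop limit (PySem.List.sorted people (fun x => x) false) := by
  unfold solution_alt
  cases hs : PySem.List.sorted people (fun x => x) false with
  | nil => simp [grpTop]
  | cons x xs =>
    simp only [List.foldl_cons, grpTop]
    rw [foldB]
    omega

theorem solInner_step (limit tmp : Int) (people : List Int) (m : Int)
    (hm : PySem.List.min? people (fun y => y) = some m)
    (hrem : PySem.List.remove? people m = some (people.erase m)) :
    solInner limit tmp people =
      if tmp + m ≤ limit then
        (if people.erase m = [] then [] else solInner limit (tmp + m) (people.erase m))
      else people := by
  conv_lhs => unfold solInner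
  split
  · next heq => simp [hm] at heq
  · next m' heq =>
    have hmm : m' = m := by
      have := heq.symm.trans hm
      exact (Option.some.injEq _ _).mp this
    subst hmm
    by_cases hc : tmp + m' ≤ limit
    · rw [if_pos hc, if_pos hc]
      split
      · next heq2 => simp [hrem] at heq2
      · next rest heq2 =>
        have hrr : rest = people.erase m' := by
          have := heq2.symm.trans hrem
          exact (Option.some.injEq _ _).mp this
        subst hrr
        rfl
    · rw [if_neg hc, if_neg hc]

theorem solOuter_step (limit answer : Int) (x m : Int) (xs : List Int)
    (hm : PySem.List.min? (x :: xs) (fun y => y) = some m)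
    (hrem : PySem.List.remove? (x :: xs) m = some ((x :: xs).erase m)) :
    solOuter limit (x :: xs) answer =
      if (x :: xs).erase m = [] then answer + 1
      else solOuter limit (solInner limit m ((x :: xs).erase m)) (answer + 1) := by
  conv_lhs => unfold solOuter
  split
  · next heq => simp [hm] at heq
  · next m' heq =>
    have hmm : m' = m := by
      have := heq.symm.trans hm
      exact (Option.some.injEq _ _).mp this
    subst hmm
    split
    · next heq2 => simp [hrem] at heq2
    · next rest heq2 =>
      have hrr : rest = (x :: xs).erase m' := by
        have := heq2.symm.trans hrem
        exact (Option.some.injEq _ _).mp this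
      subst hrr
      rfl

theorem solInner_spec (limit : Int) : ∀ (n : Nat) (people : List Int) (tmp : Int),
    people.length ≤ n → people ≠ [] →
    grp limit tmp (PySem.List.sorted people (fun x => x) false)
      = 1 + grpTop limit (PySem.List.sorted (solInner limit tmp people) (fun x => x) false) := by
  intro n
  induction n with
  | zero => intro people tmp hlen hne; cases people <;> simp_all
  | succ n ih =>
    intro people tmp hlen hne
    obtain ⟨m, hm⟩ : ∃ m, PySem.List.min? people (fun y => y) = some m := by
      cases h : PySem.List.min? people (fun y => y) with
      | none => exact absurd ((PySem.List.min?_eq_none_iff _ _).mp h) hne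
      | some m => exact ⟨m, rfl⟩
    have hmem : m ∈ people := PySem.List.min?_mem hm
    have hrem : PySem.List.remove? people m = some (people.erase m) :=
      PySem.List.remove?_eq_some_erase people m hmem
    rw [sorted_eq_min_cons hm, solInner_step limit tmp people m hm hrem]
    by_cases hc : tmp + m ≤ limit
    · rw [if_pos hc]
      simp only [grp, if_pos hc]
      by_cases he : people.erase m = []
      · rw [if_pos he, he]
        simp [PySem.List.sorted, grp, grpTop]
      · rw [if_neg he]
        have hlen' : (people.erase m).length ≤ n := by
          have h1 := List.length_erase_of_mem hmem
          have h2 := List.length_pos_of_mem hmem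
          omega
        exact ih (people.erase m) (tmp + m) hlen' he
    · rw [if_neg hc]
      simp only [grp, if_neg hc]
      rw [sorted_eq_min_cons hm, grpTop]

theorem solOuter_spec (limit : Int) : ∀ (n : Nat) (people : List Int) (answer : Int),
    people.length ≤ n → people ≠ [] →
    solOuter limit people answer
      = answer + grpTop limit (PySem.List.sorted people (fun x => x) false) := by
  intro n
  induction n with
  | zero => intro people answer hlen hne; cases people <;> simp_all
  | succ n ih =>
    intro people answer hlen hne
    obtain ⟨x, xs, rfl⟩ : ∃ x xs, people = x :: xs := by
      cases people with
      | nil => exact absurd rfl hne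
      | cons a b => exact ⟨a, b, rfl⟩
    obtain ⟨m, hm⟩ : ∃ m, PySem.List.min? (x :: xs) (fun y => y) = some m := by
      cases h : PySem.List.min? (x :: xs) (fun y => y) with
      | none => simp [PySem.List.min?_eq_none_iff] at h
      | some m => exact ⟨m, rfl⟩
    have hmem : m ∈ x :: xs := PySem.List.min?_mem hm
    have hrem : PySem.List.remove? (x :: xs) m = some ((x :: xs).erase m) :=
      PySem.List.remove?_eq_some_erase _ m hmem
    have herase_len := List.length_erase_of_mem hmem
    rw [sorted_eq_min_cons hm, grpTop, solOuter_step limit answer x m xs hm hrem]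
    by_cases he : (x :: xs).erase m = []
    · rw [if_pos he, he]
      simp [PySem.List.sorted, grp]
    · rw [if_neg he]
      have hinner := solInner_spec limit n ((x :: xs).erase m) m (by simp at hlen herase_len ⊢; omega) he
      by_cases hir : solInner limit m ((x :: xs).erase m) = []
      · rw [hir]
        have hz : solOuter limit [] (answer + 1) = answer + 1 := by simp [solOuter]
        rw [hz]
        rw [hir] at hinner
        have hs : PySem.List.sorted ([] : List Int) (fun x => x) false = [] := rfl
        rw [hs] at hinner
        simp only [grpTop] at hinner
        omega
      · have hil : (solInner limit m ((x :: xs).erase m)).length ≤ n := by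
          have h3 := solInner_length_le limit m ((x :: xs).erase m)
          simp at hlen herase_len
          omega
        rw [ih _ (answer + 1) hil hir, hinner]
        ring

-- ===== VERDICT (by name: the statement is the Claim_ definition above) =====
theorem solution_spec : Claim_equal_solution := by
  intro people limit _ hpre
  unfold Spec_solution
  obtain ⟨m, hm⟩ : ∃ m, PySem.List.min? people (fun y => y) = some m := by
    cases h : PySem.List.min? people (fun y => y) with
    | none => exact absurd ((PySem.List.min?_eq_none_iff _ _).mp h) hpre
    | some m => exact ⟨m, rfl⟩
  have h1 : solution people limit = solOuter limit people 0 := by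
    unfold solution; rw [hm]
  rw [h1, solOuter_spec limit people.length people 0 (le_refl _) hpre, solution_alt_eq]
  omega
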